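-- pv_equiv track=rewrite | github.com/sibyl-oracles/onit | src/model/serving/chat.py | _is_planning_response
-- ===== SOURCE A (Python) =====
-- _PLANNING_PREFIXES = (
--     "let me ", "i will ", "i'll ", "i'm going to ", "i am going to ",
--     "now i'll ", "now i will ", "first i'll ", "first i will ",
--     "next i'll ", "next i will ", "then i'll ", "then i will ",
--     "the user wants me to ",
-- )
--
-- def _is_planning_response(content: str) -> bool:
--     """Return True if the response looks like a plan announcement rather than a final answer.
--
--     Detects patterns like "Let me create X and then push it" where the model
--     states its intent in future tense but stops before executing tool calls.
--     Only returns True when tools are available (caller's responsibility).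
--     """
--     if not content:
--         return False
--     # Strip thinking blocks
--     text = content.split("</think>")[-1].strip() if "</think>" in content else content.strip()
--     lower = text.lower()
--     # Check sentence-start planning phrases
--     if any(lower.startswith(p) for p in _PLANNING_PREFIXES):
--         return True
--     # Check mid-sentence planning phrases (after ". " or "\n")
--     for p in _PLANNING_PREFIXES:
--         if f". {p}" in lower or f"\n{p}" in lower:
--             return True
--     return False
-- ===== SOURCE B (Python) =====
-- _PLANNING_PREFIXES = (
--     "let me ", "i will ", "i'll ", "i'm going to ", "i am going to ",
--     "now i'll ", "now i will ", "first i'll ", "first i will ",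
--     "next i'll ", "next i will ", "then i'll ", "then i will ",
--     "the user wants me to ",
-- )
--
-- def _is_planning_response(content: str) -> bool:
--     if not content:
--         return False
--     text = content.split("</think>")[-1].strip() if "</think>" in content else content.strip()
--     lower = text.lower()
--     fragments = [frag for line in lower.split("\n") for frag in line.split(". ")]
--     return any(frag.startswith(p) for frag in fragments for p in _PLANNING_PREFIXES)
-- ===== Notes on version B (the rewrite author's own statement) =====
-- stated objective: simpler
-- what changed: B replaces A's separate leading-startswith check plus per-prefix mid-sentence substring scans by splitting the lowered text once into fragments at the period-space and newline sentence boundaries (empty fragments kept) and doing a single uniform startswith pass over the fragments.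
import Mathlib
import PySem

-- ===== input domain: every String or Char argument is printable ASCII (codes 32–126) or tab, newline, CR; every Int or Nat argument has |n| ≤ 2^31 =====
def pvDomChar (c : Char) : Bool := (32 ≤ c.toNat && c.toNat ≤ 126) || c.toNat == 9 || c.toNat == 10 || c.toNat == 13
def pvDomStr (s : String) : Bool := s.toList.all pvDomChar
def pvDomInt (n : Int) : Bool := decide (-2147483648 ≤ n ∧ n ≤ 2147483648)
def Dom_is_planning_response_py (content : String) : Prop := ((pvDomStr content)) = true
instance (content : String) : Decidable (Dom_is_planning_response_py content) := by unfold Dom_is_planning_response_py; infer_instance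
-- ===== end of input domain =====

-- B replaces A's separate leading-startswith check plus per-prefix mid-sentence substring scans by splitting
-- the lowered text into fragments at the sentence boundaries and one uniform startswith pass (objective: simpler).

-- ===== PORT A =====
def PLANNING_PREFIXES : List (List Char) :=
  ["let me ".toList, "i will ".toList, "i'll ".toList, "i'm going to ".toList, "i am going to ".toList,
   "now i'll ".toList, "now i will ".toList, "first i'll ".toList, "first i will ".toList,
   "next i'll ".toList, "next i will ".toList, "then i'll ".toList, "then i will ".toList,
   "the user wants me to ".toList]

def is_planning_response_py (content : String) : Bool :=
  let cs := content.toList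
  if cs.isEmpty then false
  else
    let text :=
      if PySem.Chars.isIn "</think>".toList cs then
        PySem.Chars.strip ((PySem.List.pyGet? (PySem.Chars.splitOn cs "</think>".toList) (-1)).getD [])
      else PySem.Chars.strip cs
    let lower := PySem.Chars.lower text
    if PLANNING_PREFIXES.any (fun p => PySem.Chars.startswith lower p) then true
    else
      -- for p in _PLANNING_PREFIXES: if f". {p}" in lower or f"\n{p}" in lower: return True / return False
      PLANNING_PREFIXES.any (fun p =>
        PySem.Chars.isIn ('.' :: ' ' :: p) lower || PySem.Chars.isIn ('\n' :: p) lower)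

-- ===== PORT B =====
def is_planning_response_py_alt (content : String) : Bool :=
  let cs := content.toList
  if cs.isEmpty then false
  else
    let text :=
      if PySem.Chars.isIn "</think>".toList cs then
        PySem.Chars.strip ((PySem.List.pyGet? (PySem.Chars.splitOn cs "</think>".toList) (-1)).getD [])
      else PySem.Chars.strip cs
    let lower := PySem.Chars.lower text
    let fragments := (PySem.Chars.splitOn lower ['\n']).flatMap (fun line => PySem.Chars.splitOn line ['.', ' '])
    fragments.any (fun frag => PLANNING_PREFIXES.any (fun p => PySem.Chars.startswith frag p))

-- ===== PRECONDITION & SPEC =====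
def Spec_is_planning_response_py (content : String) (out : Bool) : Prop := out = is_planning_response_py_alt content
instance (content : String) (out : Bool) : Decidable (Spec_is_planning_response_py content out) := by unfold Spec_is_planning_response_py; infer_instance

-- ===== CLAIM (what is proved, stated in full; the proofs are below) =====
def Claim_equal_is_planning_response_py : Prop := ∀ (content : String), Dom_is_planning_response_py content → Spec_is_planning_response_py content (is_planning_response_py content)

-- ===== LEMMAS AND PROOFS =====

-- a fragment list with a character prepended to its first fragment
def prepHead (c : Char) : List (List Char) → List (List Char)
  | [] => [[c]]
  | f :: fs => (c :: f) :: fs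

-- the combined split of B: fragments between '. ' and '\n' delimiters, empties kept
def frags : List Char → List (List Char)
  | [] => [[]]
  | '\n' :: t => [] :: frags t
  | '.' :: ' ' :: t => [] :: frags t
  | c :: t => prepHead c (frags t)

def splitNL : List Char → List (List Char)
  | [] => [[]]
  | '\n' :: t => [] :: splitNL t
  | c :: t => prepHead c (splitNL t)

def splitDS : List Char → List (List Char)
  | [] => [[]]
  | '.' :: ' ' :: t => [] :: splitDS t
  | c :: t => prepHead c (splitDS t)

lemma splitNL_cons (c : Char) (rest : List Char) (h : c ≠ '\n') :
    splitNL (c :: rest) = prepHead c (splitNL rest) := by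
  rw [splitNL.eq_def]; split <;> simp_all

lemma frags_cons (c : Char) (rest : List Char) (h : c ≠ '\n') (h2 : ¬(c = '.' ∧ rest.head? = some ' ')) :
    frags (c :: rest) = prepHead c (frags rest) := by
  rcases rest with _ | ⟨d, r⟩ <;> rw [frags.eq_def] <;> split <;> simp_all

lemma splitNL_ne_nil (l : List Char) : splitNL l ≠ [] := by
  induction l using splitNL.induct <;> simp [splitNL, prepHead] <;> split <;> simp

lemma splitDS_ne_nil (l : List Char) : splitDS l ≠ [] := by
  induction l using splitDS.induct <;> simp [splitDS, prepHead] <;> split <;> simp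

lemma splitDS_cons (c : Char) (rest : List Char) (h : ¬(c = '.' ∧ rest.head? = some ' ')) :
    splitDS (c :: rest) = prepHead c (splitDS rest) := by
  rcases rest with _ | ⟨d, r⟩ <;> rw [splitDS.eq_def] <;> split <;> simp_all

lemma frags_ne_nil (l : List Char) : frags l ≠ [] := by
  induction l using frags.induct <;> simp [frags, prepHead] <;> split <;> simp

lemma goNL (fuel : Nat) (l cur : List Char) (acc : List (List Char)) (h : l.length < fuel) :
    PySem.Chars.splitOn.go ['\n'] fuel l cur acc =
      acc.reverse ++ (match splitNL l with
        | [] => [cur.reverse]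
        | f :: fs => (cur.reverse ++ f) :: fs) := by
  induction fuel generalizing l cur acc with
  | zero => omega
  | succ n ih =>
    cases l with
    | nil => simp [PySem.Chars.splitOn.go, splitNL]
    | cons c rest =>
      by_cases hc : c = '\n'
      · subst hc
        rw [show PySem.Chars.splitOn.go ['\n'] (n+1) ('\n' :: rest) cur acc =
            PySem.Chars.splitOn.go ['\n'] n (List.drop 1 ('\n'::rest)) [] (cur.reverse :: acc) by
          simp [PySem.Chars.splitOn.go, List.isPrefixOf]]
        rw [ih _ _ _ (by simp at h ⊢; omega)]
        simp only [splitNL, List.drop_succ_cons, List.drop_zero]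
        cases hs : splitNL rest with
        | nil => exact absurd hs (splitNL_ne_nil rest)
        | cons f fs => simp
      · rw [show PySem.Chars.splitOn.go ['\n'] (n+1) (c :: rest) cur acc =
            PySem.Chars.splitOn.go ['\n'] n rest (c :: cur) acc by
          simp [PySem.Chars.splitOn.go, List.isPrefixOf, Ne.symm hc]]
        rw [ih _ _ _ (by simp at h ⊢; omega)]
        rw [splitNL_cons c rest hc]
        cases hs : splitNL rest with
        | nil => exact absurd hs (splitNL_ne_nil rest)
        | cons f fs => simp [prepHead]

lemma goDS (fuel : Nat) (l cur : List Char) (acc : List (List Char)) (h : l.length < fuel) :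
    PySem.Chars.splitOn.go ['.', ' '] fuel l cur acc =
      acc.reverse ++ (match splitDS l with
        | [] => [cur.reverse]
        | f :: fs => (cur.reverse ++ f) :: fs) := by
  induction fuel generalizing l cur acc with
  | zero => omega
  | succ n ih =>
    cases l with
    | nil => simp [PySem.Chars.splitOn.go, splitDS]
    | cons c rest =>
      by_cases hp : c = '.' ∧ rest.head? = some ' '
      · obtain ⟨hc, hd⟩ := hp
        subst hc
        rcases rest with _ | ⟨d, r⟩ <;> simp only [List.head?] at hd
        · exact absurd hd (by simp)
        · have hd' : d = ' ' := by simpa using hd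
          subst hd'
          rw [show PySem.Chars.splitOn.go ['.',' '] (n+1) ('.' :: ' ' :: r) cur acc =
              PySem.Chars.splitOn.go ['.',' '] n r [] (cur.reverse :: acc) by
            simp [PySem.Chars.splitOn.go, List.isPrefixOf]]
          rw [ih _ _ _ (by simp at h ⊢; omega)]
          simp only [splitDS]
          cases hs : splitDS r with
          | nil => exact absurd hs (splitDS_ne_nil r)
          | cons f fs => simp
      · rw [show PySem.Chars.splitOn.go ['.',' '] (n+1) (c :: rest) cur acc =
            PySem.Chars.splitOn.go ['.',' '] n rest (c :: cur) acc by
          rcases rest with _ | ⟨d, r⟩ <;>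
            simp only [List.head?, not_and, Option.some.injEq] at hp <;>
            simp [PySem.Chars.splitOn.go, List.isPrefixOf] <;>
            intro hc <;> simp_all [eq_comm]]
        rw [ih _ _ _ (by simp at h ⊢; omega)]
        rw [splitDS_cons c rest hp]
        cases hs : splitDS rest with
        | nil => exact absurd hs (splitDS_ne_nil rest)
        | cons f fs => simp [prepHead]

lemma splitOn_NL (l : List Char) : PySem.Chars.splitOn l ['\n'] = splitNL l := by
  unfold PySem.Chars.splitOn
  rw [goNL _ _ _ _ (by omega)]
  cases hs : splitNL l with
  | nil => exact absurd hs (splitNL_ne_nil l)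
  | cons f fs => simp

lemma splitOn_DS (l : List Char) : PySem.Chars.splitOn l ['.', ' '] = splitDS l := by
  unfold PySem.Chars.splitOn
  rw [goDS _ _ _ _ (by omega)]
  cases hs : splitDS l with
  | nil => exact absurd hs (splitDS_ne_nil l)
  | cons f fs => simp

lemma splitNL_head_prefix (t f0 : List Char) (fs : List (List Char)) (h : splitNL t = f0 :: fs) :
    f0 <+: t := by
  induction t using splitNL.induct generalizing f0 fs with
  | case1 => simp only [splitNL, List.cons.injEq] at h; simp [h.1]
  | case2 t ih =>
    rw [show splitNL ('\n' :: t) = [] :: splitNL t from rfl] at h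
    injection h with h1 h2
    subst h1; simp
  | case3 c t hc ih =>
    rw [splitNL_cons c t (fun he => hc he)] at h
    cases hs : splitNL t with
    | nil => exact absurd hs (splitNL_ne_nil t)
    | cons g gs =>
      rw [hs] at h
      simp only [prepHead, List.cons.injEq] at h
      obtain ⟨rfl, rfl⟩ := h
      exact List.cons_prefix_cons.mpr ⟨rfl, ih g gs hs⟩

-- splitting on '\n' first and then on '. ' inside each line is the combined split
lemma flatMap_splitDS (l : List Char) : (splitNL l).flatMap splitDS = frags l := by
  induction l using frags.induct with
  | case1 => rfl
  | case2 t ih =>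
    have : splitNL ('\n' :: t) = [] :: splitNL t := rfl
    rw [this, List.flatMap_cons, ih]
    rfl
  | case3 t ih =>
    rw [splitNL_cons '.' (' ' :: t) (by decide), splitNL_cons ' ' t (by decide)]
    cases hs : splitNL t with
    | nil => exact absurd hs (splitNL_ne_nil t)
    | cons f0 fs =>
      rw [hs] at ih
      simp only [prepHead, List.flatMap_cons] at ih ⊢
      have hds : splitDS ('.' :: ' ' :: f0) = [] :: splitDS f0 := rfl
      rw [hds]
      show ([] : List Char) :: (splitDS f0 ++ fs.flatMap splitDS) = frags ('.' :: ' ' :: t)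
      rw [show frags ('.' :: ' ' :: t) = [] :: frags t from rfl, ← ih]
  | case4 c t hc h2 ih =>
    have hc' : c ≠ '\n' := fun he => hc he
    have h2' : ¬(c = '.' ∧ t.head? = some ' ') := by
      rintro ⟨rfl, hh⟩
      cases t with
      | nil => simp at hh
      | cons x r =>
        simp only [List.head?_cons, Option.some.injEq] at hh
        exact h2 r rfl (by rw [hh])
    rw [splitNL_cons c t hc']
    cases hs : splitNL t with
    | nil => exact absurd hs (splitNL_ne_nil t)
    | cons f0 fs =>
      rw [hs] at ih
      simp only [prepHead, List.flatMap_cons] at ih ⊢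
      have hf0 : ¬(c = '.' ∧ f0.head? = some ' ') := by
        have hpre : f0 <+: t := splitNL_head_prefix t f0 fs hs
        rintro ⟨rfl, hh⟩
        cases f0 with
        | nil => simp at hh
        | cons x r =>
          simp only [List.head?_cons, Option.some.injEq] at hh
          subst hh
          obtain ⟨rest, rfl⟩ := hpre
          exact h2' ⟨rfl, by simp⟩
      rw [splitDS_cons c f0 hf0, frags_cons c t hc' h2']
      cases hg : splitDS f0 with
      | nil => exact absurd hg (splitDS_ne_nil f0)
      | cons g0 gs =>
        rw [hg] at ih
        simp only [prepHead, List.cons_append] at ih ⊢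
        rw [← ih]

-- the first fragment is a prefix of the text, and what follows starts with a delimiter
lemma frags_head (t f0 : List Char) (fs : List (List Char)) (h : frags t = f0 :: fs) :
    ∃ rest, t = f0 ++ rest ∧ (rest.head? = some '\n' ∨ rest.head? = some '.' ∨ rest = []) := by
  induction t using frags.induct generalizing f0 fs with
  | case1 =>
    rw [show frags [] = [[]] from rfl] at h
    injection h with h1 h2
    subst h1
    exact ⟨[], by simp⟩
  | case2 t ih =>
    rw [show frags ('\n' :: t) = [] :: frags t from rfl] at h
    injection h with h1 h2
    subst h1
    exact ⟨'\n' :: t, by simp⟩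
  | case3 t ih =>
    rw [show frags ('.' :: ' ' :: t) = [] :: frags t from rfl] at h
    injection h with h1 h2
    subst h1
    exact ⟨'.' :: ' ' :: t, by simp⟩
  | case4 c t hc h2 ih =>
    have hc' : c ≠ '\n' := fun he => hc he
    have h2' : ¬(c = '.' ∧ t.head? = some ' ') := by
      rintro ⟨rfl, hh⟩
      cases t with
      | nil => simp at hh
      | cons x r =>
        simp only [List.head?_cons, Option.some.injEq] at hh
        exact h2 r rfl (by rw [hh])
    rw [frags_cons c t hc' h2'] at h
    cases hs : frags t with
    | nil => exact absurd hs (frags_ne_nil t)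
    | cons g gs =>
      rw [hs] at h
      simp only [prepHead, List.cons.injEq] at h
      obtain ⟨rfl, rfl⟩ := h
      obtain ⟨rest, hr1, hr2⟩ := ih g gs hs
      exact ⟨rest, by rw [hr1]; rfl, hr2⟩

-- a delimiter-free pattern is a prefix of the text iff it is a prefix of the first fragment
lemma prefix_iff_prefix_head (p t f0 : List Char) (fs : List (List Char)) (h : frags t = f0 :: fs)
    (hn : '\n' ∉ p) (hd : '.' ∉ p) : p <+: t ↔ p <+: f0 := by
  obtain ⟨rest, rfl, hr⟩ := frags_head t f0 fs h
  constructor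
  · intro hp
    by_cases hlen : p.length ≤ f0.length
    · exact List.prefix_of_prefix_length_le hp (List.prefix_append f0 rest) hlen
    · exfalso
      have hf0p : f0 <+: p :=
        List.prefix_of_prefix_length_le (List.prefix_append f0 rest) hp (by omega)
      obtain ⟨q, rfl⟩ := hf0p
      have hq : q <+: rest := (List.prefix_append_right_inj f0).mp hp
      cases q with
      | nil => simp at hlen
      | cons qh q' =>
        have hhead : rest.head? = some qh := by
          obtain ⟨s, rfl⟩ := hq
          rfl
        have hmem : qh ∈ f0 ++ qh :: q' := by simp
        rcases hr with h1 | h1 | h1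
        · rw [h1] at hhead; injection hhead with hv; subst hv; exact hn hmem
        · rw [h1] at hhead; injection hhead with hv; subst hv; exact hd hmem
        · rw [h1] at hhead; simp at hhead
  · intro hp
    exact hp.trans (List.prefix_append f0 rest)

-- '. p' or '\np' occurs in the text iff some non-first fragment starts with p
lemma midIn (p : List Char) (hn : '\n' ∉ p) (hd : '.' ∉ p) (t : List Char) :
    (PySem.Chars.isIn ('.' :: ' ' :: p) t || PySem.Chars.isIn ('\n' :: p) t) =
      (frags t).tail.any (fun f => PySem.Chars.startswith f p) := by
  induction t using frags.induct with
  | case1 =>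
    rw [Bool.eq_iff_iff, show frags [] = [[]] from rfl]
    simp [PySem.Chars.isIn_iff_infix]
  | case2 t ih =>
    rw [Bool.eq_iff_iff] at ih ⊢
    simp only [Bool.or_eq_true, PySem.Chars.isIn_iff_infix, List.any_eq_true,
      PySem.Chars.startswith_iff] at ih ⊢
    cases hs : frags t with
    | nil => exact absurd hs (frags_ne_nil t)
    | cons f0 fs =>
      rw [hs] at ih
      have hpre := prefix_iff_prefix_head p t f0 fs hs hn hd
      rw [show frags ('\n' :: t) = [] :: frags t from rfl, hs]
      have hne1 : ¬(('.' : Char) = '\n') := by decide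
      simp only [List.infix_cons_iff, List.cons_prefix_cons, List.tail_cons,
        List.mem_cons, or_and_right, exists_or, exists_eq_left] at ih ⊢
      generalize (∃ x ∈ fs, p <+: x) = E at ih ⊢
      tauto
  | case3 t ih =>
    rw [Bool.eq_iff_iff] at ih ⊢
    simp only [Bool.or_eq_true, PySem.Chars.isIn_iff_infix, List.any_eq_true,
      PySem.Chars.startswith_iff] at ih ⊢
    cases hs : frags t with
    | nil => exact absurd hs (frags_ne_nil t)
    | cons f0 fs =>
      rw [hs] at ih
      have hpre := prefix_iff_prefix_head p t f0 fs hs hn hd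
      rw [show frags ('.' :: ' ' :: t) = [] :: frags t from rfl, hs]
      have hne1 : ¬(('.' : Char) = '\n') := by decide
      have hne2 : ¬(('\n' : Char) = '.') := by decide
      have hne3 : ¬(('\n' : Char) = ' ') := by decide
      simp only [List.infix_cons_iff, List.cons_prefix_cons, List.tail_cons,
        List.mem_cons, or_and_right, exists_or, exists_eq_left] at ih ⊢
      generalize (∃ x ∈ fs, p <+: x) = E at ih ⊢
      tauto
  | case4 c t hc h2 ih =>
    have hc' : c ≠ '\n' := fun he => hc he
    have h2' : ¬(c = '.' ∧ t.head? = some ' ') := by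
      rintro ⟨rfl, hh⟩
      cases t with
      | nil => simp at hh
      | cons x r =>
        simp only [List.head?_cons, Option.some.injEq] at hh
        exact h2 r rfl (by rw [hh])
    rw [Bool.eq_iff_iff] at ih ⊢
    simp only [Bool.or_eq_true, PySem.Chars.isIn_iff_infix, List.any_eq_true,
      PySem.Chars.startswith_iff] at ih ⊢
    cases hs : frags t with
    | nil => exact absurd hs (frags_ne_nil t)
    | cons f0 fs =>
      rw [hs] at ih
      rw [frags_cons c t hc' h2', hs]
      have hnp : ¬(('.' : Char) = c ∧ ' ' :: p <+: t) := by
        rintro ⟨rfl, hsp⟩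
        obtain ⟨s, rfl⟩ := hsp
        exact h2' ⟨rfl, by simp⟩
      have hnn : ¬(('\n' : Char) = c) := fun he => hc' he.symm
      simp only [prepHead, List.infix_cons_iff, List.cons_prefix_cons, List.tail_cons,
        List.mem_cons, or_and_right, exists_or, exists_eq_left] at ih ⊢
      generalize (∃ x ∈ fs, p <+: x) = E at ih ⊢
      tauto

lemma any_swap {α β : Type} (xs : List α) (ys : List β) (g : α → β → Bool) :
    xs.any (fun a => ys.any (fun b => g a b)) = ys.any (fun b => xs.any (fun a => g a b)) := by
  rw [Bool.eq_iff_iff]; simp only [List.any_eq_true]; tauto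

lemma cond_eq (l : List Char) :
    (if PLANNING_PREFIXES.any (fun p => PySem.Chars.startswith l p) then true
     else PLANNING_PREFIXES.any (fun p =>
        PySem.Chars.isIn ('.' :: ' ' :: p) l || PySem.Chars.isIn ('\n' :: p) l)) =
      (frags l).any (fun frag => PLANNING_PREFIXES.any (fun p => PySem.Chars.startswith frag p)) := by
  have hprops : ∀ p ∈ PLANNING_PREFIXES, '\n' ∉ p ∧ '.' ∉ p := by decide
  cases hs : frags l with
  | nil => exact absurd hs (frags_ne_nil l)
  | cons f0 fs =>
    have h1 : PLANNING_PREFIXES.any (fun p => PySem.Chars.startswith l p) =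
        PLANNING_PREFIXES.any (fun p => PySem.Chars.startswith f0 p) := by
      apply PySem.List.any_congr_mem
      intro p hp
      rw [Bool.eq_iff_iff]
      simp only [PySem.Chars.startswith_iff]
      exact prefix_iff_prefix_head p l f0 fs hs (hprops p hp).1 (hprops p hp).2
    have h2 : PLANNING_PREFIXES.any (fun p =>
        PySem.Chars.isIn ('.' :: ' ' :: p) l || PySem.Chars.isIn ('\n' :: p) l) =
        PLANNING_PREFIXES.any (fun p => fs.any (fun f => PySem.Chars.startswith f p)) := by
      apply PySem.List.any_congr_mem
      intro p hp
      rw [midIn p (hprops p hp).1 (hprops p hp).2 l, hs]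
      rfl
    rw [h1, h2, List.any_cons, any_swap]
    cases hh : PLANNING_PREFIXES.any (fun p => PySem.Chars.startswith f0 p) <;> simp

-- ===== VERDICT (by name: the statement is the Claim_ definition above) =====
theorem is_planning_response_py_spec : Claim_equal_is_planning_response_py := by
  intro content _
  unfold Spec_is_planning_response_py is_planning_response_py is_planning_response_py_alt
  cases h : content.toList.isEmpty
  · simp only [h, Bool.false_eq_true, if_false]
    generalize (PySem.Chars.lower _) = l
    have hDS : List.flatMap (fun line => PySem.Chars.splitOn line ['.', ' ']) (PySem.Chars.splitOn l ['\n']) =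
        (splitNL l).flatMap splitDS := by
      rw [splitOn_NL, funext (fun f => splitOn_DS f)]
    rw [hDS, flatMap_splitDS]
    exact cond_eq l
  · simp only [h, if_true]
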